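-- pv_equiv track=rewrite | github.com/mftrhu/bmrk | bmrk.py | parse
-- ===== SOURCE A (Python) =====
-- def parse(text):
--     taglike = lambda line: line.startswith(":") and line.endswith(":")
--     url, title, tags, desc = None, None, None, ""
--     for line in text.splitlines():
--         if line.startswith(";"):
--             continue
--         if url is None:
--             url = line.lstrip("<").rstrip(">")
--         elif title is None:
--             title = line
--         elif tags is None and taglike(line):
--             tags = line.strip(":").split(":")
--         else:
--             desc += line + "\n"
--     return url, title, tags, desc.rstrip()
-- ===== SOURCE B (Python) =====
-- def parse(text):
--     lines = [l for l in text.splitlines() if not l.startswith(";")]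
--     url = lines[0].lstrip("<").rstrip(">") if lines else None
--     title = lines[1] if len(lines) > 1 else None
--     rest = lines[2:]
--     idx = next((i for i, l in enumerate(rest)
--                 if l.startswith(":") and l.endswith(":")), None)
--     if idx is None:
--         tags, desc_lines = None, rest
--     else:
--         tags = rest[idx].strip(":").split(":")
--         desc_lines = rest[:idx] + rest[idx + 1:]
--     return url, title, tags, "\n".join(desc_lines).rstrip()
-- ===== Notes on version B (the rewrite author's own statement) =====
-- stated objective: simpler
-- what changed: Replaces A's four-field state machine over every line by filter-out-comments, positional assignment of url/title, one search for the first tag-like line, and a single join for the description.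
import Mathlib
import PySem

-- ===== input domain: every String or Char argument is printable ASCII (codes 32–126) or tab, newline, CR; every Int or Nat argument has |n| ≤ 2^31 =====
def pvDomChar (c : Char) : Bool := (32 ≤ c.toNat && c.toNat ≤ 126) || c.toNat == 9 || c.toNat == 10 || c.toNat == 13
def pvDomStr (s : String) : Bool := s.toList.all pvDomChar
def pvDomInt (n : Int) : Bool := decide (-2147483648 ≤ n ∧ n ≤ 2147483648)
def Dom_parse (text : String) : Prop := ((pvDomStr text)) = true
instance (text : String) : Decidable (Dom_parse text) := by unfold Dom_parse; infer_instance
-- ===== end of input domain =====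

-- B replaces A's four-way state machine by filter-then-positional-assignment with a single
-- search for the tag line (objective: simpler decomposition, same cost).

-- ===== PORT A =====
-- lstrip("<") / rstrip(">") with a chars argument, ported by hand (exact: Python drops
-- every leading '<' resp. trailing '>'):
def lstripLtA (l : List Char) : List Char := l.dropWhile (· == '<')
def rstripGtA (l : List Char) : List Char := (l.reverse.dropWhile (· == '>')).reverse
def taglikeA (line : List Char) : Bool :=
  PySem.Chars.startswith line [':'] && PySem.Chars.endswith line [':']

def stepA (st : Option (List Char) × Option (List Char) × Option (List (List Char)) × List Char)
    (line : List Char) :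
    Option (List Char) × Option (List Char) × Option (List (List Char)) × List Char :=
  if PySem.Chars.startswith line [';'] then st
  else match st with
  | (none, title, tags, desc) => (some (rstripGtA (lstripLtA line)), title, tags, desc)
  | (some u, none, tags, desc) => (some u, some line, tags, desc)
  | (some u, some t, none, desc) =>
      if taglikeA line then
        (some u, some t, some (PySem.Chars.splitOn (PySem.Chars.stripChars line [':']) [':']), desc)
      else (some u, some t, none, desc ++ line ++ ['\n'])
  | (some u, some t, some tg, desc) => (some u, some t, some tg, desc ++ line ++ ['\n'])

def parse (text : String) : Option String × Option String × Option (List String) × String :=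
  let r := (PySem.Chars.splitlines text.toList).foldl stepA (none, none, none, [])
  (r.1.map String.ofList, r.2.1.map String.ofList, r.2.2.1.map (List.map String.ofList),
   String.ofList (PySem.Chars.rstrip r.2.2.2))

-- ===== PORT B =====
-- lines[0].lstrip("<").rstrip(">") ported by hand, exact as above
def stripAnglesB (l : List Char) : List Char :=
  ((l.dropWhile (· == '<')).reverse.dropWhile (· == '>')).reverse

def parse_alt (text : String) : Option String × Option String × Option (List String) × String :=
  let lines := (PySem.Chars.splitlines text.toList).filter
    (fun l => !PySem.Chars.startswith l [';'])
  let url := lines[0]?.map stripAnglesB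
  let title := lines[1]?
  let rest := lines.drop 2
  let td : Option (List (List Char)) × List (List Char) :=
    match rest.findIdx? (fun l => PySem.Chars.startswith l [':'] && PySem.Chars.endswith l [':']) with
    | none => (none, rest)
    | some i =>
        (some (PySem.Chars.splitOn (PySem.Chars.stripChars (rest[i]?.getD []) [':']) [':']),
         rest.take i ++ rest.drop (i + 1))
  (url.map String.ofList, title.map String.ofList, td.1.map (List.map String.ofList),
   String.ofList (PySem.Chars.rstrip (PySem.Chars.join ['\n'] td.2)))

-- ===== PRECONDITION & SPEC =====
def Spec_parse (text : String) (out : Option String × Option String × Option (List String) × String) : Prop := out = parse_alt text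
instance (text : String) (out : Option String × Option String × Option (List String) × String) : Decidable (Spec_parse text out) := by unfold Spec_parse; infer_instance

-- ===== CLAIM (what is proved, stated in full; the proofs are below) =====
def Claim_equal_parse : Prop := ∀ (text : String), Dom_parse text → Spec_parse text (parse text)

-- ===== LEMMAS AND PROOFS =====

-- A's loop body with the comment-line guard stripped (the filter carries it in B)
def stepA' (st : Option (List Char) × Option (List Char) × Option (List (List Char)) × List Char)
    (line : List Char) :
    Option (List Char) × Option (List Char) × Option (List (List Char)) × List Char :=
  match st with
  | (none, title, tags, desc) => (some (rstripGtA (lstripLtA line)), title, tags, desc)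
  | (some u, none, tags, desc) => (some u, some line, tags, desc)
  | (some u, some t, none, desc) =>
      if taglikeA line then
        (some u, some t, some (PySem.Chars.splitOn (PySem.Chars.stripChars line [':']) [':']), desc)
      else (some u, some t, none, desc ++ line ++ ['\n'])
  | (some u, some t, some tg, desc) => (some u, some t, some tg, desc ++ line ++ ['\n'])

-- what A's loop appends to desc for a list of lines
def descCat (ds : List (List Char)) : List Char := (ds.map (· ++ ['\n'])).flatten

theorem descCat_nil : descCat [] = [] := rfl
theorem descCat_cons (a : List Char) (ds : List (List Char)) :
    descCat (a :: ds) = a ++ '\n' :: descCat ds := by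
  simp [descCat]

theorem foldl_stepA_filter (L : List (List Char))
    (st : Option (List Char) × Option (List Char) × Option (List (List Char)) × List Char) :
    L.foldl stepA st = (L.filter (fun l => !PySem.Chars.startswith l [';'])).foldl stepA' st := by
  rw [List.foldl_filter]
  congr 1
  funext s l
  by_cases h : PySem.Chars.startswith l [';'] = true <;> simp [stepA, stepA', h]

theorem foldl_some (rest : List (List Char)) (u t : List Char) (tg : List (List Char))
    (desc : List Char) :
    rest.foldl stepA' (some u, some t, some tg, desc)
      = (some u, some t, some tg, desc ++ descCat rest) := by
  induction rest generalizing desc with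
  | nil => simp [descCat_nil]
  | cons a rest ih =>
      simp [List.foldl_cons, stepA', ih, descCat_cons]

theorem foldl_none (rest : List (List Char)) (u t : List Char) (desc : List Char) :
    rest.foldl stepA' (some u, some t, none, desc)
      = match rest.findIdx? taglikeA with
        | none => (some u, some t, none, desc ++ descCat rest)
        | some i =>
            (some u, some t,
             some (PySem.Chars.splitOn (PySem.Chars.stripChars (rest[i]?.getD []) [':']) [':']),
             desc ++ descCat (rest.take i ++ rest.drop (i + 1))) := by
  induction rest generalizing desc with
  | nil => simp [descCat_nil]
  | cons a rest ih =>
      by_cases h : taglikeA a = true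
      · simp [List.foldl_cons, stepA', h, foldl_some, List.findIdx?_cons]
      · rw [List.foldl_cons]
        have hs : stepA' (some u, some t, none, desc) a = (some u, some t, none, desc ++ a ++ ['\n']) := by
          simp [stepA', h]
        rw [hs, ih, List.findIdx?_cons, if_neg (by simp [h])]
        cases hfi : rest.findIdx? taglikeA with
        | none => simp [descCat_cons]
        | some i => simp [descCat_cons, List.take_succ_cons, List.drop_succ_cons]

theorem isspace_newline : PySem.Chars.isspace '\n' = true := by decide

theorem rstrip_append_newline (xs : List Char) :
    PySem.Chars.rstrip (xs ++ ['\n']) = PySem.Chars.rstrip xs := by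
  simp [PySem.Chars.rstrip, isspace_newline]

theorem descCat_eq_join (a : List Char) (ds : List (List Char)) :
    descCat (a :: ds) = PySem.Chars.join ['\n'] (a :: ds) ++ ['\n'] := by
  induction ds generalizing a with
  | nil => rw [descCat_cons, descCat_nil, PySem.Chars.join_singleton]
  | cons b ds ih =>
      rw [descCat_cons, PySem.Chars.join_cons_cons, ih b]
      simp

theorem rstrip_descCat (ds : List (List Char)) :
    PySem.Chars.rstrip (descCat ds) = PySem.Chars.rstrip (PySem.Chars.join ['\n'] ds) := by
  cases ds with
  | nil => rfl
  | cons a ds => rw [descCat_eq_join, rstrip_append_newline]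

-- ===== VERDICT (by name: the statement is the Claim_ definition above) =====
theorem parse_spec : Claim_equal_parse := by
  intro text _
  unfold Spec_parse parse parse_alt
  rw [foldl_stepA_filter]
  have htag : (fun l => PySem.Chars.startswith l [':'] && PySem.Chars.endswith l [':']) = taglikeA := rfl
  have hstrip : stripAnglesB = fun l => rstripGtA (lstripLtA l) := rfl
  cases hL : (PySem.Chars.splitlines text.toList).filter
      (fun l => !PySem.Chars.startswith l [';']) with
  | nil => rfl
  | cons a L1 =>
      cases L1 with
      | nil => rfl
      | cons b rest =>
          simp only [List.foldl_cons, stepA', foldl_none, htag, hstrip]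
          cases hfi : rest.findIdx? taglikeA with
          | none => simp [hfi, rstrip_descCat]
          | some i => simp [hfi, rstrip_descCat]
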